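-- pv_equiv track=rewrite | github.com/oojiang/aoc-2024 | 10/logic.py | get_accessible_summits
-- ===== SOURCE A (Python) =====
-- from typing import List, Tuple, Set, TypeAlias
-- from enum import Enum
--
-- Coor: TypeAlias = Tuple[int, int]
--
-- class Direction(Enum):
--     UP      = (-1,  0)
--     DOWN    = ( 1,  0)
--     LEFT    = ( 0, -1)
--     RIGHT   = ( 0,  1)
--
--     def __init__(self, x, y):
--         self.vec = (x, y)
--
-- SUMMIT = 9
--
-- def get_accessible_summits(topomap: List[List[int]]) -> List[List[Set[Coor]]]:
--     summits = [[set() for _ in range(len(topomap[0]))] for _ in range(len(topomap))]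
--     for r in range(len(topomap)):
--         for c in range(len(topomap[0])):
--             if topomap[r][c] == SUMMIT:
--                 summits[r][c].add((r, c))
--
--     for i in reversed(range(SUMMIT + 1)):
--         for r in range(len(topomap)):
--             for c in range(len(topomap[0])):
--                 if topomap[r][c] == i:
--                     for direction in Direction:
--                         new_r = r + direction.vec[0]
--                         new_c = c + direction.vec[1]
--                         if len(topomap) > new_r >= 0 \
--                             and len(topomap[0]) > new_c >= 0 \
--                             and topomap[new_r][new_c] == i - 1:
--                                 summits[new_r][new_c].update(summits[r][c])
--     return summits
-- ===== SOURCE B (Python) =====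
-- from typing import List, Tuple, Set, TypeAlias
--
-- Coor: TypeAlias = Tuple[int, int]
--
-- def get_accessible_summits(topomap: List[List[int]]) -> List[List[Set[Coor]]]:
--     # Bucket the cells by height in one pass, then run the 10 downhill
--     # propagation levels over just the cells of that height (same order as
--     # a row-major scan), instead of A's re-scan of the whole grid per level.
--     R = len(topomap)
--     C = len(topomap[0])
--     summits = [[set() for _ in range(C)] for _ in range(R)]
--     by_height = {}
--     for r in range(R):
--         for c in range(C):
--             h = topomap[r][c]
--             if h == 9:
--                 summits[r][c].add((r, c))
--             by_height.setdefault(h, []).append((r, c))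
--     for i in range(9, -1, -1):
--         for r, c in by_height.get(i, []):
--             for dr, dc in ((-1, 0), (1, 0), (0, -1), (0, 1)):
--                 nr = r + dr
--                 nc = c + dc
--                 if R > nr >= 0 and C > nc >= 0 and topomap[nr][nc] == i - 1:
--                     summits[nr][nc] |= summits[r][c]
--     return summits
-- ===== Notes on version B (the rewrite author's own statement) =====
-- stated objective: alternative
-- what changed: B buckets the grid cells by height in a single one-pass dict and runs each of the 10 propagation levels over only that height's cell list, replacing A's 10 full-grid rescans; same propagation order, so identical results.
-- outside the precondition, e.g. on get_accessible_summits([]): A returns [], B raises IndexError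
import Mathlib
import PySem

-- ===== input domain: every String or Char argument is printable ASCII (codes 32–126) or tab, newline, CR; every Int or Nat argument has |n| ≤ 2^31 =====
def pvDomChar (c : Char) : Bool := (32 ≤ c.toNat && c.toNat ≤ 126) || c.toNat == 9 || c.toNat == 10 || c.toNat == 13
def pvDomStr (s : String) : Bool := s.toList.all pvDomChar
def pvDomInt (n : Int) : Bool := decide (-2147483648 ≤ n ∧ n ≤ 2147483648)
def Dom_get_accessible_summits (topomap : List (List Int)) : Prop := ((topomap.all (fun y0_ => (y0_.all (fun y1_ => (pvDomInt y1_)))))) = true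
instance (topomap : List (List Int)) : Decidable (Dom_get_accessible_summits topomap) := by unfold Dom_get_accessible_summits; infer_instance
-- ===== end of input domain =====

-- B buckets the cells by height in one pass and runs each of the 10 propagation levels
-- over just that height's cell list, instead of A's 10 full-grid rescans (objective: alternative).

-- shared subscript helpers: 'topomap[r][c]' and the in-place 'summits[r][c] = f(summits[r][c])'
def pvHt (topomap : List (List Int)) (r c : Int) : Int :=
  PySem.List.pyGetD (PySem.List.pyGetD topomap r []) c 0

def pvGmod (g : List (List (List (Int × Int)))) (r c : Int)
    (f : List (Int × Int) → List (Int × Int)) : List (List (List (Int × Int))) :=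
  PySem.List.pySetD g r
    (PySem.List.pySetD (PySem.List.pyGetD g r []) c
      (f (PySem.List.pyGetD (PySem.List.pyGetD g r []) c [])))

-- ===== PORT A =====
def get_accessible_summits (topomap : List (List Int)) : List (List (List (Int × Int))) :=
  let s0 := (PySem.List.pyRange 0 (topomap.length : Int) 1).map (fun _ =>
    (PySem.List.pyRange 0 ((PySem.List.pyGetD topomap 0 []).length : Int) 1).map (fun _ => ([] : List (Int × Int))))
  let s1 := (PySem.List.pyRange 0 (topomap.length : Int) 1).foldl (fun g r =>
    (PySem.List.pyRange 0 ((PySem.List.pyGetD topomap 0 []).length : Int) 1).foldl (fun g c =>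
      if pvHt topomap r c = 9 then pvGmod g r c (fun s => PySem.Set.add s (r, c)) else g) g) s0
  (PySem.List.pyRange 9 (-1) (-1)).foldl (fun g i =>
    (PySem.List.pyRange 0 (topomap.length : Int) 1).foldl (fun g r =>
      (PySem.List.pyRange 0 ((PySem.List.pyGetD topomap 0 []).length : Int) 1).foldl (fun g c =>
        if pvHt topomap r c = i then
          [((-1 : Int), (0 : Int)), (1, 0), (0, -1), (0, 1)].foldl (fun g d =>
            let nr := r + d.1
            let nc := c + d.2
            if (topomap.length : Int) > nr ∧ nr ≥ 0 ∧ ((PySem.List.pyGetD topomap 0 []).length : Int) > nc ∧ nc ≥ 0 ∧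
                pvHt topomap nr nc = i - 1 then
              pvGmod g nr nc (fun s => PySem.Set.update s (PySem.List.pyGetD (PySem.List.pyGetD g r []) c []))
            else g) g
        else g) g) g) s1

-- ===== PORT B =====
def get_accessible_summits_alt (topomap : List (List Int)) : List (List (List (Int × Int))) :=
  let R : Int := (topomap.length : Int)
  let C : Int := ((PySem.List.pyGetD topomap 0 []).length : Int)
  let st := (PySem.List.pyRange 0 R 1).foldl (fun st r =>
    (PySem.List.pyRange 0 C 1).foldl (fun st c =>
      ((if pvHt topomap r c = 9 then pvGmod st.1 r c (fun s => PySem.Set.add s (r, c)) else st.1),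
       PySem.Dict.modify st.2 (pvHt topomap r c) [] (fun l => l ++ [(r, c)]))) st) 
    ((PySem.List.pyRange 0 R 1).map (fun _ => (PySem.List.pyRange 0 C 1).map (fun _ => ([] : List (Int × Int)))),
     (PySem.Dict.empty : PySem.Dict Int (List (Int × Int))))
  (PySem.List.pyRange 9 (-1) (-1)).foldl (fun g i =>
    (PySem.Dict.getD st.2 i []).foldl (fun g p =>
      [((-1 : Int), (0 : Int)), (1, 0), (0, -1), (0, 1)].foldl (fun g d =>
        let nr := p.1 + d.1
        let nc := p.2 + d.2
        if R > nr ∧ nr ≥ 0 ∧ C > nc ∧ nc ≥ 0 ∧ pvHt topomap nr nc = i - 1 then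
          pvGmod g nr nc (fun s => PySem.Set.update s (PySem.List.pyGetD (PySem.List.pyGetD g p.1 []) p.2 []))
        else g) g) g) st.1

-- ===== PRECONDITION & SPEC =====
-- Pre_ excludes the grids on which A raises IndexError mid-scan (a row shorter than the first row,
-- when that first row is nonempty) and the empty grid, where A happens to return [] because its inner
-- len(topomap[0]) is never evaluated, while B's natural up-front C = len(topomap[0]) raises IndexError.
def Pre_get_accessible_summits (topomap : List (List Int)) : Prop :=
  topomap ≠ [] ∧ ∀ row ∈ topomap, (PySem.List.pyGetD topomap 0 []).length ≤ row.length
instance (topomap : List (List Int)) : Decidable (Pre_get_accessible_summits topomap) := by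
  unfold Pre_get_accessible_summits; infer_instance

def pvWitness_get_accessible_summits : List (List Int) := [[8, 9], [9, 0]]

def Spec_get_accessible_summits (topomap : List (List Int)) (out : List (List (List (Int × Int)))) : Prop := out = get_accessible_summits_alt topomap
instance (topomap : List (List Int)) (out : List (List (List (Int × Int)))) : Decidable (Spec_get_accessible_summits topomap out) := by unfold Spec_get_accessible_summits; infer_instance

-- ===== CLAIM (what is proved, stated in full; the proofs are below) =====
def Claim_equal_get_accessible_summits : Prop := ∀ (topomap : List (List Int)), Dom_get_accessible_summits topomap → Pre_get_accessible_summits topomap → Spec_get_accessible_summits topomap (get_accessible_summits topomap)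

-- ===== LEMMAS AND PROOFS =====

-- row-major list of all cell coordinates
def pvCells (R C : Int) : List (Int × Int) :=
  (PySem.List.pyRange 0 R 1).flatMap (fun r => (PySem.List.pyRange 0 C 1).map (fun c => (r, c)))

-- the shared inner direction loop, as a function of the pushing cell
def pvPush (topomap : List (List Int)) (R C i : Int)
    (g : List (List (List (Int × Int)))) (p : Int × Int) : List (List (List (Int × Int))) :=
  [((-1 : Int), (0 : Int)), (1, 0), (0, -1), (0, 1)].foldl (fun g d =>
    let nr := p.1 + d.1
    let nc := p.2 + d.2
    if R > nr ∧ nr ≥ 0 ∧ C > nc ∧ nc ≥ 0 ∧ pvHt topomap nr nc = i - 1 then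
      pvGmod g nr nc (fun s => PySem.Set.update s (PySem.List.pyGetD (PySem.List.pyGetD g p.1 []) p.2 []))
    else g) g

theorem pvNested2Flat {γ : Type} (R C : Int) (F : γ → Int × Int → γ) (init : γ) :
    (PySem.List.pyRange 0 R 1).foldl (fun g r =>
      (PySem.List.pyRange 0 C 1).foldl (fun g c => F g (r, c)) g) init
    = (pvCells R C).foldl F init := by
  simp [pvCells, List.foldl_flatMap, List.foldl_map]

theorem pvFoldlIteFilter {α γ : Type} (p : α → Prop) [DecidablePred p] (f : γ → α → γ)
    (l : List α) (init : γ) :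
    l.foldl (fun acc x => if p x then f acc x else acc) init
    = (l.filter (fun x => decide (p x))).foldl f init := by
  induction l generalizing init with
  | nil => rfl
  | cons x xs ih => by_cases h : p x <;> simp [h, ih]

theorem pvBucketEq (topomap : List (List Int)) (R C i : Int) :
    PySem.Dict.getD ((pvCells R C).foldl (fun d p =>
        PySem.Dict.modify d (pvHt topomap p.1 p.2) [] (fun l => l ++ [p])) PySem.Dict.empty) i []
    = (pvCells R C).filter (fun p => decide (pvHt topomap p.1 p.2 = i)) := by
  have h := PySem.Dict.getD_foldl_modify_append
    ((pvCells R C).map (fun p => (pvHt topomap p.1 p.2, p)))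
    (PySem.Dict.empty : PySem.Dict Int (List (Int × Int))) i
  rw [List.foldl_map] at h
  rw [h]
  simp [List.filter_map, List.map_map, Function.comp_def]
  exact List.filter_congr fun x _ => rfl

theorem pvLevelEq (topomap : List (List Int)) (R C i : Int) (g : List (List (List (Int × Int)))) :
    (PySem.List.pyRange 0 R 1).foldl (fun g r =>
      (PySem.List.pyRange 0 C 1).foldl (fun g c =>
        if pvHt topomap r c = i then pvPush topomap R C i g (r, c) else g) g) g
    = (PySem.Dict.getD ((pvCells R C).foldl (fun d p =>
        PySem.Dict.modify d (pvHt topomap p.1 p.2) [] (fun l => l ++ [p])) PySem.Dict.empty) i []).foldl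
        (pvPush topomap R C i) g := by
  rw [pvBucketEq,
      pvNested2Flat R C (fun g p => if pvHt topomap p.1 p.2 = i then pvPush topomap R C i g p else g),
      pvFoldlIteFilter (fun p => pvHt topomap p.1 p.2 = i) (pvPush topomap R C i)]

theorem pvFoldl2Prod {σ₁ σ₂ α β : Type} (l₁ : List α) (l₂ : List β)
    (f : σ₁ → α → β → σ₁) (g : σ₂ → α → β → σ₂) (a : σ₁) (b : σ₂) :
    l₁.foldl (fun st x => l₂.foldl (fun st y => (f st.1 x y, g st.2 x y)) st) (a, b)
    = (l₁.foldl (fun s x => l₂.foldl (fun s y => f s x y) s) a,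
       l₁.foldl (fun s x => l₂.foldl (fun s y => g s x y) s) b) := by
  have h : (fun (st : σ₁ × σ₂) (x : α) => l₂.foldl (fun st y => (f st.1 x y, g st.2 x y)) st)
      = fun st x => (l₂.foldl (fun s y => f s x y) st.1, l₂.foldl (fun s y => g s x y) st.2) := by
    funext st x
    exact PySem.List.foldl_prod_mk (fun s y => f s x y) (fun s y => g s x y) l₂ st.1 st.2
  rw [h]
  exact PySem.List.foldl_prod_mk (fun s x => l₂.foldl (fun s y => f s x y) s)
    (fun s x => l₂.foldl (fun s y => g s x y) s) l₁ a b

theorem pvMainEq (topomap : List (List Int)) :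
    get_accessible_summits topomap = get_accessible_summits_alt topomap := by
  simp only [get_accessible_summits, get_accessible_summits_alt]
  rw [pvFoldl2Prod (PySem.List.pyRange 0 (topomap.length : Int) 1)
        (PySem.List.pyRange 0 ((PySem.List.pyGetD topomap 0 []).length : Int) 1)
        (fun g r c => if pvHt topomap r c = 9 then pvGmod g r c (fun s => PySem.Set.add s (r, c)) else g)
        (fun d r c => PySem.Dict.modify d (pvHt topomap r c) [] (fun l => l ++ [(r, c)]))]
  dsimp only
  rw [pvNested2Flat (topomap.length : Int) ((PySem.List.pyGetD topomap 0 []).length : Int)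
        (fun d p => PySem.Dict.modify d (pvHt topomap p.1 p.2) [] (fun l => l ++ [p]))]
  congr 1
  funext g i
  exact pvLevelEq topomap (topomap.length : Int) ((PySem.List.pyGetD topomap 0 []).length : Int) i g

-- ===== VERDICT (by name: the statement is the Claim_ definition above) =====
theorem get_accessible_summits_spec : Claim_equal_get_accessible_summits := by
  intro topomap _ _
  unfold Spec_get_accessible_summits
  exact pvMainEq topomap
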